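-- pv_equiv track=rewrite | github.com/AyaDoukarr/Need2Hire | data/data_layer.py | build_subfamilies_map
-- ===== SOURCE A (Python) =====
-- from typing import Any, Dict, List
--
-- def build_subfamilies_map(rows: List[Dict[str, Any]]) -> Dict[str, List[str]]:
--     mapping: Dict[str, List[str]] = {}
--     for row in rows:
--         fam = (row.get("famille_metier_axa", "") or "").strip()
--         sub = (row.get("sous_famille_metier", "") or "").strip()
--         if not fam or not sub:
--             continue
--         mapping.setdefault(fam, [])
--         if sub not in mapping[fam]:
--             mapping[fam].append(sub)
--
--     for fam in mapping:
--         mapping[fam] = sorted(mapping[fam])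
--
--     return mapping
-- ===== SOURCE B (Python) =====
-- from typing import Any, Dict, List
--
-- def build_subfamilies_map(rows: List[Dict[str, Any]]) -> Dict[str, List[str]]:
--     # pass 1: extract the valid (fam, sub) pairs
--     pairs = []
--     for row in rows:
--         fam = (row.get("famille_metier_axa", "") or "").strip()
--         sub = (row.get("sous_famille_metier", "") or "").strip()
--         if fam and sub:
--             pairs.append((fam, sub))
--     # pass 2: distinct families, in order of first appearance
--     fams = []
--     for f, _ in pairs:
--         if f not in fams:
--             fams.append(f)
--     # pass 3: one full scan per family; sorted() of a set comprehension
--     return {f: sorted({s for g, s in pairs if g == f}) for f in fams}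
-- ===== Notes on version B (the rewrite author's own statement) =====
-- stated objective: alternative
-- what changed: B uses no dictionary accumulator at all: it extracts the valid (fam, sub) pairs, computes the distinct family list, then builds each family's value with an independent full scan (set comprehension + sorted), instead of A's incremental dict with per-append membership dedup and an in-place sorting pass.
import Mathlib
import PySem

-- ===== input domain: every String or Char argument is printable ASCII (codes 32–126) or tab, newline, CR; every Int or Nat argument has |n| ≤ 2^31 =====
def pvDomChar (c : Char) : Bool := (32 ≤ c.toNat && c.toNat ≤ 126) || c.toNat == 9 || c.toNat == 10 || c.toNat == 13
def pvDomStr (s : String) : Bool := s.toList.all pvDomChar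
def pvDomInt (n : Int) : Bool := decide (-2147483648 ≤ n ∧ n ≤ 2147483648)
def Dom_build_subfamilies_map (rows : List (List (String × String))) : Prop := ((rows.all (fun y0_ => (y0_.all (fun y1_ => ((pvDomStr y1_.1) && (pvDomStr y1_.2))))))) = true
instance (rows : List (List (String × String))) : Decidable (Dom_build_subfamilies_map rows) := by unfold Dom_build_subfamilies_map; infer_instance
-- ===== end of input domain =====

-- B replaces A's incremental dict accumulator (setdefault + per-append membership dedup + an in-place sorting
-- pass) by three dict-free passes: extract valid pairs, list the distinct families, then one independent full
-- scan per family with sorted(set comprehension) (alternative decomposition; return value only).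
-- ('row.get(k, "") or ""' is the identity on the String values of this signature, so both ports drop the 'or ""'.)

-- ===== PORT A =====
def build_subfamilies_map (rows : List (List (String × String))) : List (String × List String) :=
  let mapping := rows.foldl (fun m row =>
    let fam := PySem.Str.strip ((PySem.Dict.mk row).getD "famille_metier_axa" "")
    let sub := PySem.Str.strip ((PySem.Dict.mk row).getD "sous_famille_metier" "")
    if fam = "" ∨ sub = "" then m
    else
      let m' := PySem.Dict.setdefault m fam ([] : List String)
      if sub ∈ m'.getD fam [] then m'
      else PySem.Dict.modify m' fam [] (fun v => v ++ [sub])) PySem.Dict.empty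
  -- 'for fam in mapping: mapping[fam] = sorted(mapping[fam])' then 'return mapping'
  mapping.items.map (fun p => (p.1, PySem.List.sorted p.2 (fun x => x) false))

-- ===== PORT B =====
def build_subfamilies_map_alt (rows : List (List (String × String))) : List (String × List String) :=
  -- pass 1: the valid (fam, sub) pairs
  let pairs := rows.foldl (fun ps row =>
    let fam := PySem.Str.strip ((PySem.Dict.mk row).getD "famille_metier_axa" "")
    let sub := PySem.Str.strip ((PySem.Dict.mk row).getD "sous_famille_metier" "")
    if fam ≠ "" ∧ sub ≠ "" then ps ++ [(fam, sub)] else ps) []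
  -- pass 2: distinct families in first-appearance order ('if f not in fams: fams.append(f)')
  let fams := pairs.foldl (fun fs p => if p.1 ∈ fs then fs else fs ++ [p.1]) []
  -- pass 3: per family, sorted({s for g, s in pairs if g == f})
  fams.map (fun f =>
    (f, PySem.List.sorted (PySem.Set.ofList ((pairs.filter (fun p => p.1 == f)).map (·.2))) (fun x => x) false))

-- ===== PRECONDITION & SPEC =====
def Spec_build_subfamilies_map (rows : List (List (String × String))) (out : List (String × List String)) : Prop := out = build_subfamilies_map_alt rows
instance (rows : List (List (String × String))) (out : List (String × List String)) : Decidable (Spec_build_subfamilies_map rows out) := by unfold Spec_build_subfamilies_map; infer_instance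

-- ===== CLAIM =====
def Claim_equal_build_subfamilies_map : Prop := ∀ (rows : List (List (String × String))), Dom_build_subfamilies_map rows → Spec_build_subfamilies_map rows (build_subfamilies_map rows)

-- ===== LEMMAS AND PROOFS =====

-- the valid pair a row contributes, if any (used only by the proofs, to factor both ports' row tests)
def pvValidPair? (row : List (String × String)) : Option (String × String) :=
  let fam := PySem.Str.strip ((PySem.Dict.mk row).getD "famille_metier_axa" "")
  let sub := PySem.Str.strip ((PySem.Dict.mk row).getD "sous_famille_metier" "")
  if fam = "" ∨ sub = "" then none else some (fam, sub)

-- A's loop step, acting on an extracted valid pair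
def pvStepA (m : PySem.Dict String (List String)) (p : String × String) : PySem.Dict String (List String) :=
  let m' := PySem.Dict.setdefault m p.1 ([] : List String)
  if p.2 ∈ m'.getD p.1 [] then m'
  else PySem.Dict.modify m' p.1 [] (fun v => v ++ [p.2])

lemma setdefault_keys (d : PySem.Dict String (List String)) (k : String) :
    (PySem.Dict.setdefault d k []).keys = PySem.Set.add d.keys k := by
  simp only [PySem.Dict.setdefault, PySem.Set.add, PySem.Dict.contains_iff_mem_keys, PySem.Set.contains]
  split_ifs with h1 h2 h3 <;> simp_all [PySem.Dict.keys]

lemma setdefault_getD (d : PySem.Dict String (List String)) (k c : String) :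
    (PySem.Dict.setdefault d k []).getD c [] = d.getD c [] := by
  simp only [PySem.Dict.setdefault]
  split_ifs with h1
  · rfl
  · simp only [PySem.Dict.getD, PySem.Dict.get?, List.find?_append]
    rcases hf : List.find? (fun p => p.1 == c) d.items with _ | p
    · simp [hf]
      by_cases hkc : k = c
      · subst hkc
        simp [PySem.Dict.contains_eq_isSome_get?, PySem.Dict.get?, hf] at h1 ⊢
      · simp [hkc]
    · simp [hf]

lemma setdefault_contains_self (d : PySem.Dict String (List String)) (k : String) :
    (PySem.Dict.setdefault d k []).contains k = true := by
  simp only [PySem.Dict.setdefault]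
  split_ifs with h1
  · exact h1
  · simp

lemma stepA_getD (m : PySem.Dict String (List String)) (k s c : String) :
    (pvStepA m (k, s)).getD c [] = if c = k then PySem.Set.add (m.getD c []) s else m.getD c [] := by
  unfold pvStepA
  simp only
  set m' := PySem.Dict.setdefault m k [] with hm'
  have hg : ∀ c, m'.getD c [] = m.getD c [] := fun c => setdefault_getD m k c
  split_ifs with hmem hck hck
  · subst hck
    rw [hg, PySem.Set.add]
    rw [hg] at hmem
    simp [PySem.Set.contains, hmem]
  · exact hg c
  · subst hck
    rw [PySem.Dict.getD_modify, if_pos rfl, hg, PySem.Set.add]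
    rw [hg] at hmem
    simp [PySem.Set.contains, hmem]
  · rw [PySem.Dict.getD_modify, if_neg hck, hg]

lemma stepA_keys (m : PySem.Dict String (List String)) (k s : String) :
    (pvStepA m (k, s)).keys = PySem.Set.add m.keys k := by
  unfold pvStepA
  simp only
  split_ifs with hmem
  · exact setdefault_keys m k
  · rw [PySem.Dict.keys_modify, PySem.Dict.keys_insert_of_contains _ _ (setdefault_contains_self m k),
      setdefault_keys m k]

lemma foldA_getD (ps : List (String × String)) (m : PySem.Dict String (List String)) (c : String) :
    ((ps.foldl pvStepA m).getD c []) = PySem.Set.update (m.getD c []) ((ps.filter (fun p => p.1 == c)).map (·.2)) := by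
  induction ps generalizing m with
  | nil => rfl
  | cons p rest ih =>
    obtain ⟨k, s⟩ := p
    simp only [List.foldl_cons, ih, stepA_getD, List.filter_cons]
    by_cases hck : c = k
    · subst hck; simp [PySem.Set.update]
    · have : (k == c) = false := by simp [Ne.symm hck]
      simp [this, hck]

lemma foldA_keys (ps : List (String × String)) (m : PySem.Dict String (List String)) :
    (ps.foldl pvStepA m).keys = PySem.Set.update m.keys (ps.map (·.1)) := by
  induction ps generalizing m with
  | nil => rfl
  | cons p rest ih =>
    obtain ⟨k, s⟩ := p
    simp only [List.foldl_cons, ih, stepA_keys, List.map_cons, PySem.Set.update]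

lemma items_map_eq_keys_map {ν : Type} (d : PySem.Dict String ν) (dflt : ν)
    (h : d.keys.Nodup) (g : String → ν → String × List String) :
    d.items.map (fun p => g p.1 p.2) = d.keys.map (fun k => g k (d.getD k dflt)) := by
  have h1 : d.items.map (fun p => g p.1 p.2) = d.items.map (fun p => g p.1 (d.getD p.1 dflt)) := by
    apply List.map_congr_left
    intro p hp
    rw [PySem.Dict.getD_of_mem_items d (by simpa using hp) h]
  rw [h1]
  show _ = (d.items.map (·.1)).map (fun k => g k (d.getD k dflt))
  rw [List.map_map]
  rfl

lemma a_body_eq (m : PySem.Dict String (List String)) (row : List (String × String)) :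
    (let fam := PySem.Str.strip ((PySem.Dict.mk row).getD "famille_metier_axa" "")
     let sub := PySem.Str.strip ((PySem.Dict.mk row).getD "sous_famille_metier" "")
     if fam = "" ∨ sub = "" then m
     else
       let m' := PySem.Dict.setdefault m fam ([] : List String)
       if sub ∈ m'.getD fam [] then m'
       else PySem.Dict.modify m' fam [] (fun v => v ++ [sub]))
    = (match pvValidPair? row with | none => m | some p => pvStepA m p) := by
  simp only [pvValidPair?]
  by_cases h : PySem.Str.strip ((PySem.Dict.mk row).getD "famille_metier_axa" "") = "" ∨ PySem.Str.strip ((PySem.Dict.mk row).getD "sous_famille_metier" "") = ""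
  · simp [h]
  · simp only [if_neg h]; rfl

lemma a_foldl_eq_pairs_foldl (rows : List (List (String × String))) (m : PySem.Dict String (List String)) :
    rows.foldl (fun m row =>
      let fam := PySem.Str.strip ((PySem.Dict.mk row).getD "famille_metier_axa" "")
      let sub := PySem.Str.strip ((PySem.Dict.mk row).getD "sous_famille_metier" "")
      if fam = "" ∨ sub = "" then m
      else
        let m' := PySem.Dict.setdefault m fam ([] : List String)
        if sub ∈ m'.getD fam [] then m'
        else PySem.Dict.modify m' fam [] (fun v => v ++ [sub])) m
    = (rows.filterMap pvValidPair?).foldl pvStepA m := by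
  induction rows generalizing m with
  | nil => rfl
  | cons row rest ih =>
    simp only [List.foldl_cons, List.filterMap_cons]
    rw [a_body_eq]
    cases hp : pvValidPair? row
    · rw [ih]
    · rw [ih, List.foldl_cons]

-- B's pass 1 collects exactly the valid pairs (filterMap form)
lemma b_pairs_eq (rows : List (List (String × String))) (acc : List (String × String)) :
    rows.foldl (fun ps row =>
      let fam := PySem.Str.strip ((PySem.Dict.mk row).getD "famille_metier_axa" "")
      let sub := PySem.Str.strip ((PySem.Dict.mk row).getD "sous_famille_metier" "")
      if fam ≠ "" ∧ sub ≠ "" then ps ++ [(fam, sub)] else ps) acc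
    = acc ++ rows.filterMap pvValidPair? := by
  induction rows generalizing acc with
  | nil => simp
  | cons row rest ih =>
    simp only [List.foldl_cons, List.filterMap_cons, pvValidPair?]
    by_cases h : PySem.Str.strip ((PySem.Dict.mk row).getD "famille_metier_axa" "") = "" ∨ PySem.Str.strip ((PySem.Dict.mk row).getD "sous_famille_metier" "") = ""
    · have h' : ¬ (PySem.Str.strip ((PySem.Dict.mk row).getD "famille_metier_axa" "") ≠ "" ∧ PySem.Str.strip ((PySem.Dict.mk row).getD "sous_famille_metier" "") ≠ "") := by tauto
      rw [if_neg h', if_pos h, ih]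
      rfl
    · have h' : PySem.Str.strip ((PySem.Dict.mk row).getD "famille_metier_axa" "") ≠ "" ∧ PySem.Str.strip ((PySem.Dict.mk row).getD "sous_famille_metier" "") ≠ "" := by tauto
      rw [if_pos h', if_neg h, ih, List.append_assoc]
      rfl

-- B's pass 2 is set(first appearances) of the family components
lemma b_fams_eq (ps : List (String × String)) :
    ps.foldl (fun fs p => if p.1 ∈ fs then fs else fs ++ [p.1]) []
    = PySem.Set.ofList (ps.map (·.1)) := by
  have hfun : (fun fs (p : String × String) => if p.1 ∈ fs then fs else fs ++ [p.1])
      = (fun fs p => PySem.Set.add fs p.1) := by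
    funext fs p
    simp [PySem.Set.add, PySem.Set.contains]
  rw [hfun, PySem.Set.ofList_eq_foldl, List.foldl_map]

-- ===== VERDICT =====
theorem build_subfamilies_map_spec : Claim_equal_build_subfamilies_map := by
  intro rows _
  show build_subfamilies_map rows = build_subfamilies_map_alt rows
  unfold build_subfamilies_map build_subfamilies_map_alt
  simp only [a_foldl_eq_pairs_foldl, b_pairs_eq, List.nil_append, b_fams_eq]
  set ps := rows.filterMap pvValidPair? with hps
  set dA := ps.foldl pvStepA PySem.Dict.empty with hdA
  have hkA : dA.keys = PySem.Set.ofList (ps.map (·.1)) := foldA_keys ps PySem.Dict.empty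
  have hnA : dA.keys.Nodup := by rw [hkA]; exact PySem.Set.nodup_ofList _
  have hv : ∀ c, dA.getD c [] = PySem.Set.ofList ((ps.filter (fun p => p.1 == c)).map (·.2)) := by
    intro c
    rw [hdA, foldA_getD]
    rfl
  rw [items_map_eq_keys_map dA ([] : List String) hnA
        (fun k v => (k, PySem.List.sorted v (fun x => x) false)),
      hkA]
  exact List.map_congr_left (fun k _ => by rw [hv k])
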